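-- pv_equiv track=rewrite | github.com/mingovvv/study-2025 | week_02/algorithm/mk.jang/Problem03.py | solution
-- ===== SOURCE A (Python) =====
-- def solution(players, m, k):
--
--     # 서버 증설 횟수
--     additional_server_cnt = 0
--     # (반납시간, 서버 수) 리스트
--     server_expiry = []
--
--     for time, user_cnt in enumerate(players):
--
--         # 만료된 서버는 리스트에서 제거
--         server_expiry = [(expiry_time, cnt) for expiry_time, cnt in server_expiry if expiry_time > time]
--
--         current_server_cnt = 0
--         for expiry, cnt in server_expiry:
--             current_server_cnt += cnt
--
--         # 필요한 서버 수 계산(몫)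
--         required_server_cnt = user_cnt // m
--
--         # 3. 서버 증설이 필요한 경우 추가
--         if required_server_cnt > current_server_cnt:
--             additional_servers = required_server_cnt - current_server_cnt
--             additional_server_cnt += additional_servers
--             server_expiry.append((time + k, additional_servers))
--
--     return additional_server_cnt
-- ===== SOURCE B (Python) =====
-- def solution(players, m, k):
--     # One pass with a running active-server count and an expiry queue consumed
--     # from the front (expiry times are strictly increasing), instead of
--     # rebuilding and re-summing the whole expiry list at every time step.
--     total = 0
--     active = 0
--     queue = []   # (expiry_time, cnt), expiry strictly increasing
--     head = 0
--     for time, user_cnt in enumerate(players):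
--         while head < len(queue) and queue[head][0] <= time:
--             active -= queue[head][1]
--             head += 1
--         required = user_cnt // m
--         if required > active:
--             d = required - active
--             total += d
--             active += d
--             queue.append((time + k, d))
--     return total
-- ===== Notes on version B (the rewrite author's own statement) =====
-- stated objective: faster
-- what changed: B keeps a running active-server count and consumes an expiry queue from the front (expiries are strictly increasing), instead of re-filtering the whole expiry list and re-summing it with an inner loop at every time step; Pre_ excludes m == 0, where A (and B) raise ZeroDivisionError.
import Mathlib
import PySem

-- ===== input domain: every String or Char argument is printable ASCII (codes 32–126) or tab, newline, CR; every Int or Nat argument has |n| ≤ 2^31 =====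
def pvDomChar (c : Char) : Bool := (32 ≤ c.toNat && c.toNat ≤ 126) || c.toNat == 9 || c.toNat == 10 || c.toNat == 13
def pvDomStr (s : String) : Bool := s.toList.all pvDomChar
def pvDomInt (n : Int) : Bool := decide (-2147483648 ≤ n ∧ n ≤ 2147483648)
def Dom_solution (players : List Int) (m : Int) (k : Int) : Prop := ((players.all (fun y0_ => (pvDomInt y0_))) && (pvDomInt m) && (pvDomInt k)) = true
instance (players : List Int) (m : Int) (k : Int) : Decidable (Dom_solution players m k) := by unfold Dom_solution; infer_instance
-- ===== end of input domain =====

-- B replaces A's per-step re-filter + inner summation loop by a running active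
-- count with an expiry queue consumed from the front (objective: faster, O(n) vs O(n^2)).

-- ===== PORT A =====
-- one loop iteration of A: filter expired, re-sum the survivors, add servers if short
def stepA (m k : Int) (st : Int × List (Int × Int)) (tu : Int × Int) : Int × List (Int × Int) :=
  let time := tu.1
  let expiry := st.2.filter (fun e => decide (time < e.1))
  let current := expiry.foldl (fun a e => a + e.2) 0
  let req := PySem.Int.floordiv tu.2 m
  if current < req then
    (st.1 + (req - current), expiry ++ [(time + k, req - current)])
  else (st.1, expiry)

def solution (players : List Int) (m : Int) (k : Int) : Int :=
  ((PySem.List.enumerate players 0).foldl (stepA m k) (0, [])).1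

-- ===== PORT B =====
-- Source B's while loop: pop expired entries off the front of the queue, decreasing `active`
def dropExpired (time : Int) : List (Int × Int) → Int → Int × List (Int × Int)
  | [], active => (active, [])
  | e :: rest, active =>
    if e.1 ≤ time then dropExpired time rest (active - e.2)
    else (active, e :: rest)

-- one loop iteration of B: state (total, active, queue)
def stepB (m k : Int) (st : Int × Int × List (Int × Int)) (tu : Int × Int) : Int × Int × List (Int × Int) :=
  let p := dropExpired tu.1 st.2.2 st.2.1
  let active := p.1
  let q := p.2
  let req := PySem.Int.floordiv tu.2 m
  if active < req then
    (st.1 + (req - active), active + (req - active), q ++ [(tu.1 + k, req - active)])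
  else (st.1, active, q)

def solution_alt (players : List Int) (m : Int) (k : Int) : Int :=
  ((PySem.List.enumerate players 0).foldl (stepB m k) (0, 0, [])).1

-- ===== PRECONDITION & SPEC =====
-- Pre_ excludes exactly m = 0, where A's 'user_cnt // m' raises ZeroDivisionError
-- (B raises there too); for an empty players list no division happens and A returns 0.
def Pre_solution (players : List Int) (m : Int) (k : Int) : Prop := players = [] ∨ m ≠ 0
instance (players : List Int) (m : Int) (k : Int) : Decidable (Pre_solution players m k) := by unfold Pre_solution; infer_instance

def pvWitness_solution : List Int × Int × Int := ([5, 3, 8], 2, 2)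

def Spec_solution (players : List Int) (m : Int) (k : Int) (out : Int) : Prop := out = solution_alt players m k
instance (players : List Int) (m : Int) (k : Int) (out : Int) : Decidable (Spec_solution players m k out) := by unfold Spec_solution; infer_instance

-- ===== CLAIM (what is proved, stated in full; the proofs are below) =====
def Claim_equal_solution : Prop := ∀ (players : List Int) (m : Int) (k : Int), Dom_solution players m k → Pre_solution players m k → Spec_solution players m k (solution players m k)

-- ===== LEMMAS AND PROOFS =====

def sumCnt (l : List (Int × Int)) : Int := l.foldl (fun a e => a + e.2) 0

theorem sumCnt_eq (l : List (Int × Int)) : sumCnt l = (l.map Prod.snd).sum := by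
  simpa using PySem.List.foldl_add (l := l) (a := 0) (g := Prod.snd)

theorem sumCnt_cons (e : Int × Int) (l : List (Int × Int)) :
    sumCnt (e :: l) = e.2 + sumCnt l := by
  simp [sumCnt_eq]

theorem sumCnt_append (l₁ l₂ : List (Int × Int)) :
    sumCnt (l₁ ++ l₂) = sumCnt l₁ + sumCnt l₂ := by
  simp [sumCnt_eq]

theorem dropExpired_eq (t : Int) :
    ∀ (q : List (Int × Int)), q.Pairwise (fun a b => a.1 < b.1) →
      dropExpired t q (sumCnt q) =
        (sumCnt (q.filter (fun e => decide (t < e.1))), q.filter (fun e => decide (t < e.1))) := by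
  intro q
  induction q with
  | nil => intro _; rfl
  | cons e rest ih =>
    intro hpw
    rw [List.pairwise_cons] at hpw
    by_cases h : e.1 ≤ t
    · have hf : (decide (t < e.1)) = false := by simp; omega
      rw [show ((e :: rest).filter (fun e => decide (t < e.1)))
            = rest.filter (fun e => decide (t < e.1)) by simp [hf]]
      rw [show dropExpired t (e :: rest) (sumCnt (e :: rest))
            = dropExpired t rest (sumCnt (e :: rest) - e.2) by simp [dropExpired, h]]
      rw [show sumCnt (e :: rest) - e.2 = sumCnt rest by rw [sumCnt_cons]; ring]
      exact ih hpw.2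
    · have hall : ∀ x ∈ e :: rest, t < x.1 := by
        intro x hx
        rcases List.mem_cons.mp hx with rfl | hx
        · omega
        · exact lt_trans (by omega) (hpw.1 x hx)
      rw [List.filter_eq_self.mpr (fun x hx => by simpa using hall x hx)]
      simp [dropExpired, h]

theorem main_inv (m k : Int) :
    ∀ (l : List Int) (s cnt act : Int) (q : List (Int × Int)),
      act = sumCnt q →
      q.Pairwise (fun a b => a.1 < b.1) →
      (∀ e ∈ q, e.1 < s + k) →
      ((PySem.List.enumerate l s).foldl (stepA m k) (cnt, q)).1
        = ((PySem.List.enumerate l s).foldl (stepB m k) (cnt, act, q)).1 := by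
  intro l
  induction l with
  | nil => intro s cnt act q _ _ _; rfl
  | cons x xs ih =>
    intro s cnt act q hact hpw hbd
    rw [PySem.List.enumerate_cons, List.foldl_cons, List.foldl_cons]
    -- evaluate one step of each
    have hdrop := dropExpired_eq s q hpw
    set E := q.filter (fun e => decide (s < e.1)) with hE
    have hEsub : ∀ e ∈ E, e ∈ q := fun e he => List.mem_of_mem_filter he
    have hEpw : E.Pairwise (fun a b => a.1 < b.1) :=
      List.Pairwise.sublist List.filter_sublist hpw
    have hEbd : ∀ e ∈ E, e.1 < s + k := fun e he => hbd e (hEsub e he)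
    have hA : stepA m k (cnt, q) (s, x) =
        (if sumCnt E < PySem.Int.floordiv x m then
          (cnt + (PySem.Int.floordiv x m - sumCnt E), E ++ [(s + k, PySem.Int.floordiv x m - sumCnt E)])
        else (cnt, E)) := by
      simp only [stepA, ← hE]
      rfl
    have hB : stepB m k (cnt, act, q) (s, x) =
        (if sumCnt E < PySem.Int.floordiv x m then
          (cnt + (PySem.Int.floordiv x m - sumCnt E),
           sumCnt E + (PySem.Int.floordiv x m - sumCnt E),
           E ++ [(s + k, PySem.Int.floordiv x m - sumCnt E)])
        else (cnt, sumCnt E, E)) := by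
      simp only [stepB, hact, hdrop]
    rw [hA, hB]
    by_cases hreq : sumCnt E < PySem.Int.floordiv x m
    · simp only [if_pos hreq]
      apply ih
      · rw [sumCnt_append, sumCnt_cons]; simp [sumCnt]
      · rw [List.pairwise_append]
        refine ⟨hEpw, List.pairwise_singleton _ _, ?_⟩
        intro a ha b hb
        rcases List.mem_singleton.mp hb with rfl
        exact hEbd a ha
      · intro e he
        rcases List.mem_append.mp he with he | he
        · have := hEbd e he; omega
        · rcases List.mem_singleton.mp he with rfl; simp
    · simp only [if_neg hreq]
      apply ih
      · rfl
      · exact hEpw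
      · intro e he; have := hEbd e he; omega

-- ===== VERDICT (by name: the statement is the Claim_ definition above) =====
theorem solution_spec : Claim_equal_solution := by
  intro players m k _ _
  unfold Spec_solution solution solution_alt
  exact main_inv m k players 0 0 0 [] rfl (List.Pairwise.nil) (by simp)
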